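-- pv_equiv track=rewrite | github.com/keithwegner/knives-out | src/knives_out/builtin_auth.py | _status_matches_expected
-- ===== SOURCE A (Python) =====
-- def _status_matches_expected(status_code: int | None, expected_statuses: list[str]) -> bool:
--     if status_code is None:
--         return False
--     for expected in expected_statuses:
--         normalized = expected.strip().lower()
--         if not normalized:
--             continue
--         if normalized.endswith("xx") and len(normalized) == 3 and normalized[0].isdigit():
--             if status_code // 100 == int(normalized[0]):
--                 return True
--             continue
--         if normalized.isdigit() and status_code == int(normalized):
--             return True
--     return False
-- ===== SOURCE B (Python) =====
-- def _status_matches_expected(status_code, expected_statuses):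
--     codes = set()
--     for raw in expected_statuses:
--         p = raw.strip().lower()
--         if len(p) == 3 and p.endswith("xx") and p[0].isdigit():
--             codes.update(range(int(p[0]) * 100, (int(p[0]) + 1) * 100))
--         elif p.isdigit():
--             codes.add(int(p))
--     return status_code is not None and status_code in codes
-- ===== Notes on version B (the rewrite author's own statement) =====
-- stated objective: alternative
-- what changed: B compiles the pattern list into the explicit set of all accepted status codes - each 'Nxx' wildcard is expanded into the hundred concrete codes N00..N99 - and answers with a single set-membership test, so B never divides the status code and has no per-pattern match logic or early return.
import Mathlib
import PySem

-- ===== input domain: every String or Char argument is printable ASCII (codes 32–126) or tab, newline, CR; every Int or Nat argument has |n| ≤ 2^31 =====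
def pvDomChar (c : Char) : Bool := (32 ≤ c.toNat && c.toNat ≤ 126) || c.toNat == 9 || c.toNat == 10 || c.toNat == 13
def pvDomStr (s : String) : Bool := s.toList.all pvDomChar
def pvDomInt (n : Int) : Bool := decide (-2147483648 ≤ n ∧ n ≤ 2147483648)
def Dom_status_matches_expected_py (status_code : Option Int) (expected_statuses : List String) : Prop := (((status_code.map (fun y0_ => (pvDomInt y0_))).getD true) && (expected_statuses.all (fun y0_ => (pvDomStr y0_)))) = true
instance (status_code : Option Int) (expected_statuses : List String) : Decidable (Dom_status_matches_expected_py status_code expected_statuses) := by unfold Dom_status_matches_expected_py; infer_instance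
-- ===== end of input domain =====

-- B compiles the pattern list into the explicit set of all accepted status codes
-- (each 'Nxx' wildcard expanded into the hundred codes N00..N99) and answers with
-- one membership test; B never divides the status code. Same asymptotic cost.

-- ===== PORT A =====
-- A's loop over expected_statuses, deciding inside the scan (branch-and-return).
def pvGoA (c : Int) : List String → Bool
  | [] => false
  | e :: rest =>
    let n := PySem.Chars.lower (PySem.Chars.strip e.toList)
    if n.isEmpty then pvGoA c rest
    else if PySem.Chars.endswith n ['x','x'] && n.length == 3
            && PySem.Chars.isdigit (n.headD ' ') then
      -- Python indexes n[0] under the len==3 guard, so headD never sees the default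
      if PySem.Int.floordiv c 100 == (PySem.Int.ofChars? [n.headD ' ']).getD 0 then true
      else pvGoA c rest
    else if PySem.Chars.strIsdigit n && c == (PySem.Int.ofChars? n).getD 0 then true
    else pvGoA c rest

def status_matches_expected_py (status_code : Option Int) (expected_statuses : List String) : Bool :=
  match status_code with
  | none => false
  | some c => pvGoA c expected_statuses

-- ===== PORT B =====
-- B's loop body: add every status code the pattern accepts to the set
-- (codes.update(range(int(p[0])*100, (int(p[0])+1)*100)) resp. codes.add(int(p))).
def pvStepB (codes : PySem.Set Int) (raw : String) : PySem.Set Int :=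
  let p := PySem.Chars.lower (PySem.Chars.strip raw.toList)
  if p.length == 3 && PySem.Chars.endswith p ['x','x']
      && PySem.Chars.isdigit (p.headD ' ') then
    -- Python indexes p[0] under the len==3 guard, so headD never sees the default
    PySem.Set.update codes
      (PySem.List.pyRange (((PySem.Int.ofChars? [p.headD ' ']).getD 0) * 100)
        ((((PySem.Int.ofChars? [p.headD ' ']).getD 0) + 1) * 100))
  else if PySem.Chars.strIsdigit p then
    PySem.Set.add codes ((PySem.Int.ofChars? p).getD 0)
  else codes

def status_matches_expected_py_alt (status_code : Option Int) (expected_statuses : List String) : Bool :=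
  let codes := expected_statuses.foldl pvStepB PySem.Set.empty
  match status_code with
  | none => false
  | some c => PySem.Set.contains codes c

-- ===== PRECONDITION & SPEC =====
def Spec_status_matches_expected_py (status_code : Option Int) (expected_statuses : List String) (out : Bool) : Prop := out = status_matches_expected_py_alt status_code expected_statuses
instance (status_code : Option Int) (expected_statuses : List String) (out : Bool) : Decidable (Spec_status_matches_expected_py status_code expected_statuses out) := by unfold Spec_status_matches_expected_py; infer_instance

-- ===== CLAIM (what is proved, stated in full; the proofs are below) =====
def Claim_equal_status_matches_expected_py : Prop := ∀ (status_code : Option Int) (expected_statuses : List String), Dom_status_matches_expected_py status_code expected_statuses → Spec_status_matches_expected_py status_code expected_statuses (status_matches_expected_py status_code expected_statuses)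

-- ===== LEMMAS AND PROOFS =====

theorem pv_contains_add (s : PySem.Set Int) (x y : Int) :
    PySem.Set.contains (PySem.Set.add s x) y = (PySem.Set.contains s y || decide (y = x)) := by
  simp [PySem.Set.contains_eq_listContains, PySem.Set.mem_add]

theorem pv_contains_update (xs : List Int) : ∀ (s : PySem.Set Int) (y : Int),
    PySem.Set.contains (PySem.Set.update s xs) y = (PySem.Set.contains s y || decide (y ∈ xs)) := by
  induction xs with
  | nil => intro s y; simp [PySem.Set.update]
  | cons x t ih =>
    intro s y
    have : PySem.Set.update s (x :: t) = PySem.Set.update (PySem.Set.add s x) t := by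
      simp [PySem.Set.update]
    rw [this, ih, pv_contains_add]
    by_cases h : y = x <;> simp [h]

-- a status code lies in the expanded range of a wildcard iff its century matches
theorem pv_mem_range_iff (c d : Int) :
    decide (c ∈ PySem.List.pyRange (d * 100) ((d + 1) * 100)) = (PySem.Int.floordiv c 100 == d) := by
  have h := PySem.Int.floordiv_eq_iff_of_pos (a := c) (b := (100 : Int)) (q := d) (by norm_num)
  by_cases hd : PySem.Int.floordiv c 100 = d
  · rcases h.mp hd with ⟨h1, h2⟩
    rw [decide_eq_true (PySem.List.mem_pyRange_one.mpr ⟨h1, h2⟩), beq_iff_eq.mpr hd]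
  · rw [beq_eq_false_iff_ne.mpr hd, decide_eq_false]
    intro hmem
    rcases PySem.List.mem_pyRange_one.mp hmem with ⟨h1, h2⟩
    exact hd (h.mpr ⟨h1, h2⟩)

-- loop invariant: membership in the compiled code set equals a prior hit or a hit in the tail
theorem pvB_foldl (c : Int) (es : List String) :
    ∀ (s : PySem.Set Int),
      PySem.Set.contains (es.foldl pvStepB s) c = (PySem.Set.contains s c || pvGoA c es) := by
  induction es with
  | nil => intro s; simp [pvGoA]
  | cons e rest ih =>
    intro s
    simp only [List.foldl_cons, pvStepB, pvGoA]
    set n := PySem.Chars.lower (PySem.Chars.strip e.toList) with hn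
    by_cases h0 : n.isEmpty = true
    · have hnil : n = [] := List.isEmpty_iff.mp h0
      rw [if_pos h0]
      rw [if_neg (by simp [hnil]), if_neg (by simp [hnil, PySem.Chars.strIsdigit])]
      exact ih s
    · rw [if_neg h0]
      by_cases h1 : (PySem.Chars.endswith n ['x','x'] && n.length == 3
          && PySem.Chars.isdigit (n.headD ' ')) = true
      · have h1' : (n.length == 3 && PySem.Chars.endswith n ['x','x']
            && PySem.Chars.isdigit (n.headD ' ')) = true := by
          rw [Bool.and_comm (n.length == 3)]; exact h1
        rw [if_pos h1', if_pos h1, ih, pv_contains_update, pv_mem_range_iff]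
        by_cases h2 : PySem.Int.floordiv c 100 = (PySem.Int.ofChars? [n.headD ' ']).getD 0
        · rw [if_pos (beq_iff_eq.mpr h2), beq_iff_eq.mpr h2]
          simp only [Bool.or_true, Bool.true_or]
        · rw [if_neg (fun h => h2 (beq_iff_eq.mp h)), beq_eq_false_iff_ne.mpr h2]
          simp only [Bool.or_false]
      · have h1' : (n.length == 3 && PySem.Chars.endswith n ['x','x']
            && PySem.Chars.isdigit (n.headD ' ')) = false := by
          rw [Bool.and_comm (n.length == 3)]; exact Bool.eq_false_iff.mpr h1
        rw [if_neg (Bool.eq_false_iff.mp h1'), if_neg h1]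
        by_cases h2 : PySem.Chars.strIsdigit n = true
        · rw [if_pos h2, ih, pv_contains_add]
          by_cases h3 : c = (PySem.Int.ofChars? n).getD 0
          · rw [if_pos (by simp only [Bool.and_eq_true]; exact ⟨h2, beq_iff_eq.mpr h3⟩), decide_eq_true h3]
            simp only [Bool.or_true, Bool.true_or]
          · rw [if_neg (by simp only [Bool.and_eq_true]; exact fun h => h3 (beq_iff_eq.mp h.2)), decide_eq_false h3]
            simp only [Bool.or_false]
        · rw [if_neg h2, if_neg (by simp [h2])]
          exact ih s

-- ===== VERDICT (by name: the statement is the Claim_ definition above) =====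
theorem status_matches_expected_py_spec : Claim_equal_status_matches_expected_py := by
  intro status_code expected_statuses _
  unfold Spec_status_matches_expected_py status_matches_expected_py status_matches_expected_py_alt
  cases status_code with
  | none => rfl
  | some c =>
    simp only []
    rw [pvB_foldl c expected_statuses PySem.Set.empty]
    simp [PySem.Set.empty, PySem.Set.contains_eq_listContains]
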